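-- pv_equiv track=rewrite | github.com/dexkum-2myzZy-jipzid/leetcode | LeetCode/3818.Minimum_Prefix_Removal_to_Make_Array_Strictly_Increasing/3818.Minimum_Prefix_Removal_to_Make_Array_Strictly_Increasing.py | minimumPrefixLength
-- ===== SOURCE A (Python) =====
-- def minimumPrefixLength(nums: list[int]) -> int:
--
--     cnt = 1
--     for i in range(len(nums) - 1, 0, -1):
--         if nums[i] > nums[i - 1]:
--             cnt += 1
--             continue
--         else:
--             break
--
--     return len(nums) - cnt
-- ===== SOURCE B (Python) =====
-- def minimumPrefixLength(nums: list[int]) -> int: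
--     cnt = 1
--     for i in range(1, len(nums)):
--         cnt = cnt + 1 if nums[i] > nums[i - 1] else 1
--     return len(nums) - cnt
-- ===== Notes on version B (the rewrite author's own statement) =====
-- stated objective: alternative
-- what changed: Replaces the backward scan with early break by a single forward pass that maintains the length of the strictly-increasing run ending at each index (reset to 1 on a non-increase), returning len - final run length.
import Mathlib
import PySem

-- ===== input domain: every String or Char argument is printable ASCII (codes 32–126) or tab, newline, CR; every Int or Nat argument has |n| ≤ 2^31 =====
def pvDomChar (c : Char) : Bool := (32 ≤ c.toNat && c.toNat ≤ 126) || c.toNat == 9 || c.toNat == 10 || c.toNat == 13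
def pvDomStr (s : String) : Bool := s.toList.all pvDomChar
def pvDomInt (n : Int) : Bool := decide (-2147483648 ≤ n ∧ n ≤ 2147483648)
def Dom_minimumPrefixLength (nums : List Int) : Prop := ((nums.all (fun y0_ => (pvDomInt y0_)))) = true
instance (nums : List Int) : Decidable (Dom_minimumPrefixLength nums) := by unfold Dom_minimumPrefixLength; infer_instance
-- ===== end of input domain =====

-- B replaces A's backward scan with early break by a single forward pass maintaining the
-- length of the strictly-increasing run ending at the current index (alternative decomposition, same cost).


-- ===== PORT A =====
-- A's loop 'for i in range(len(nums)-1, 0, -1): … else break' counts successful iterations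
-- from the top index downward and stops at the first failure; indices i and i-1 are always in
-- range (1 ≤ i ≤ len-1), so List.getD is exact here.
def pvALoop (nums : List Int) (i : Nat) : Int :=
  if h : 1 ≤ i then
    if nums.getD i 0 > nums.getD (i - 1) 0 then 1 + pvALoop nums (i - 1) else 0
  else 0

def minimumPrefixLength (nums : List Int) : Int :=
  (nums.length : Int) - (1 + pvALoop nums (nums.length - 1))

-- ===== PORT B =====
-- forward pass: cnt = length of the strictly increasing run ending at the current element
def pvBLoop (prev cnt : Int) (xs : List Int) : Int :=
  match xs with
  | [] => cnt
  | x :: t => pvBLoop x (if x > prev then cnt + 1 else 1) t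

def minimumPrefixLength_alt (nums : List Int) : Int :=
  (nums.length : Int) -
    (match nums with
     | [] => 1
     | x :: xs => pvBLoop x 1 xs)

-- ===== PRECONDITION & SPEC =====
def Spec_minimumPrefixLength (nums : List Int) (out : Int) : Prop := out = minimumPrefixLength_alt nums
instance (nums : List Int) (out : Int) : Decidable (Spec_minimumPrefixLength nums out) := by unfold Spec_minimumPrefixLength; infer_instance

-- ===== CLAIM (what is proved, stated in full; the proofs are below) =====
def Claim_equal_minimumPrefixLength : Prop := ∀ (nums : List Int), Dom_minimumPrefixLength nums → Spec_minimumPrefixLength nums (minimumPrefixLength nums)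

-- ===== LEMMAS AND PROOFS =====

-- B's loop on a snoc: the final step either extends the run or resets it to 1.
theorem pvBLoop_snoc (xs : List Int) (prev cnt a : Int) :
    pvBLoop prev cnt (xs ++ [a]) =
      if a > (prev :: xs).getLast (by simp) then pvBLoop prev cnt xs + 1 else 1 := by
  induction xs generalizing prev cnt with
  | nil => simp [pvBLoop]
  | cons x t ih =>
      simp only [List.cons_append, pvBLoop]
      rw [ih]
      simp [List.getLast]

-- A's loop at an index below the appended element ignores the appended element.
theorem pvALoop_append (ys : List Int) (a : Int) (i : Nat) (h : i < ys.length) :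
    pvALoop (ys ++ [a]) i = pvALoop ys i := by
  induction i using Nat.strong_induction_on with
  | _ i ih =>
      unfold pvALoop
      split
      · next h1 =>
          rw [List.getD_append _ _ _ _ h, List.getD_append _ _ _ _ (by omega)]
          split
          · rw [ih (i - 1) (by omega) (by omega)]
          · rfl
      · rfl

-- A's loop at the top index of a snoc list.
theorem pvALoop_snoc_top (ys : List Int) (a : Int) (hne : ys ≠ []) :
    pvALoop (ys ++ [a]) ys.length =
      if a > ys.getLast hne then 1 + pvALoop ys (ys.length - 1) else 0 := by
  have hlen : 1 ≤ ys.length := by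
    cases ys with | nil => exact absurd rfl hne | cons _ _ => simp
  unfold pvALoop
  rw [dif_pos hlen]
  have h1 : (ys ++ [a]).getD ys.length 0 = a := by
    simp [List.getD]
  have h2 : (ys ++ [a]).getD (ys.length - 1) 0 = ys.getLast hne := by
    rw [List.getD_append _ _ _ _ (by omega), List.getD_eq_getElem _ _ (by omega),
      List.getLast_eq_getElem]
  rw [h1, h2]
  split
  · rw [pvALoop_append ys a _ (by omega)]
    conv_lhs => rw [pvALoop]
  · rfl

-- the two run counters agree on every nonempty list
theorem cnt_eq (l : List Int) (hne : l ≠ []) :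
    1 + pvALoop l (l.length - 1) =
      (match l with
       | [] => (1 : Int)
       | x :: xs => pvBLoop x 1 xs) := by
  induction l using List.reverseRecOn with
  | nil => exact absurd rfl hne
  | append_singleton ys a ih =>
      cases ys with
      | nil => simp [pvALoop, pvBLoop]
      | cons y t =>
          have hys : (y :: t) ≠ [] := by simp
          have hlen : ((y :: t) ++ [a]).length - 1 = (y :: t).length := by simp
          rw [hlen, pvALoop_snoc_top (y :: t) a hys]
          simp only [List.cons_append]
          rw [pvBLoop_snoc t y 1 a]
          have := ih hys
          simp only at this
          split
          · rw [← this]; ring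
          · rfl

-- ===== VERDICT (by name: the statement is the Claim_ definition above) =====
theorem minimumPrefixLength_spec : Claim_equal_minimumPrefixLength := by
  intro nums _
  unfold Spec_minimumPrefixLength minimumPrefixLength minimumPrefixLength_alt
  cases nums with
  | nil => simp [pvALoop]
  | cons x xs => rw [cnt_eq (x :: xs) (by simp)]
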